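-- pv_equiv track=rewrite | github.com/1b0325h/ac-python | algorithm/imos_1.py | imos_1
-- ===== SOURCE A (Python) =====
-- def imos_1(start: list, end: list, add: list) -> list:
--    table = [0] * (x := max(end)+2)
--
--    for i in range(len(start)):
--       table[start[i]] += add[i]
--       table[end[i]+1] -= add[i]
--
--    for i in range(1, x):
--       table[i] += table[i-1]
--
--    return table
-- ===== SOURCE B (Python) =====
-- def imos_1(start: list, end: list, add: list) -> list:
--     marks = [0] * (max(end) + 2)
--     for s, e, a in zip(start, end, add):
--         marks[s] += a
--         marks[e + 1] -= a
--     out = []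
--     acc = sum(marks)
--     for v in reversed(marks):
--         out.append(acc)
--         acc -= v
--     out.reverse()
--     return out
-- ===== Notes on version B (the rewrite author's own statement) =====
-- stated objective: alternative
-- what changed: Keeps the difference-array marking (done over zip(start,end,add) instead of an index loop) but replaces the in-place left-to-right prefix-sum mutation by a right-to-left pass that subtracts each mark from the grand total, building a fresh output list back-to-front.
import Mathlib
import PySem

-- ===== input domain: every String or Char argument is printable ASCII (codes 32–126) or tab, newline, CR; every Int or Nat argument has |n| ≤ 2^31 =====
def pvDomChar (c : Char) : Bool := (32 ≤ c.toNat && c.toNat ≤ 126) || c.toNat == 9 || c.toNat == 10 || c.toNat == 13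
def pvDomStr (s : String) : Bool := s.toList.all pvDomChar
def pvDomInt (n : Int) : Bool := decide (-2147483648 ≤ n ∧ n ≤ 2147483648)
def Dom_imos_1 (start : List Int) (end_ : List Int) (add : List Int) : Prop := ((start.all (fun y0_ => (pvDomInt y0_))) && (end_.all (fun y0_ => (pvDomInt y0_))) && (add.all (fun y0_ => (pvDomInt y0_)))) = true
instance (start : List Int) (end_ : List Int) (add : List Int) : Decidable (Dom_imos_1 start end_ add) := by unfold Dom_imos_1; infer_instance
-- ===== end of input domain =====

-- B keeps the difference-array marking (over zipped triples) but replaces the in-place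
-- left-to-right prefix-sum pass by a right-to-left suffix subtraction from the grand total,
-- building a fresh output list back-to-front (objective: alternative; B is not faster).

-- ===== PORT A =====
-- table[p] += v  (read then write; none = IndexError; Python negative-index semantics via PySem)
def pvBump (t : List Int) (p v : Int) : Option (List Int) := do
  let w ← PySem.List.pyGet? t p
  PySem.List.pySet? t p (w + v)

-- body of A's first loop: table[start[i]] += add[i]; table[end[i]+1] -= add[i]
def pvMarkStep (start end_ add : List Int) (acc : Option (List Int)) (i : ℕ) : Option (List Int) := do
  let t ← acc
  let s ← PySem.List.pyGet? start (i : Int)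
  let a ← PySem.List.pyGet? add (i : Int)
  let t1 ← pvBump t s a
  let e ← PySem.List.pyGet? end_ (i : Int)
  pvBump t1 (e + 1) (-a)

-- body of A's second loop: table[i] += table[i-1]
def pvPrefStep (acc : Option (List Int)) (i : Int) : Option (List Int) := do
  let t ← acc
  let v ← PySem.List.pyGet? t i
  let w ← PySem.List.pyGet? t (i - 1)
  PySem.List.pySet? t i (v + w)

def imos_1 (start : List Int) (end_ : List Int) (add : List Int) : List Int :=
  match PySem.List.max? end_ (fun y => y) with
  | none => []
  | some m =>
    let x : Int := m + 2
    let table : List Int := List.replicate x.toNat 0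
    let t2 : Option (List Int) :=
      (PySem.List.pyRange 1 x 1).foldl pvPrefStep
        ((List.range start.length).foldl (pvMarkStep start end_ add) (some table))
    t2.getD []

-- ===== PORT B =====
-- body of B's marking loop over a zipped triple ((s, e), a): marks[s] += a; marks[e+1] -= a
def pvBStep (acc : Option (List Int)) (p : (Int × Int) × Int) : Option (List Int) := do
  let t ← acc
  let t1 ← pvBump t p.1.1 p.2
  pvBump t1 (p.1.2 + 1) (-p.2)

def imos_1_alt (start : List Int) (end_ : List Int) (add : List Int) : List Int :=
  match PySem.List.max? end_ (fun y => y) with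
  | none => []
  | some m =>
    let marks0 : List Int := List.replicate (m + 2).toNat 0
    match ((start.zip end_).zip add).foldl pvBStep (some marks0) with
    | none => []
    | some marks =>
      -- out/acc loop over reversed(marks): out.append(acc); acc -= v; then out.reverse()
      let q := marks.reverse.foldl
        (fun (q : List Int × Int) v => (q.1 ++ [q.2], q.2 - v)) ([], marks.sum)
      q.1.reverse

-- ===== PRECONDITION & SPEC =====
-- max(end_)+2, the size of A's table (0 when end_ is empty, which Pre_ excludes anyway)
def pvTop (end_ : List Int) : Int :=
  match end_ with
  | [] => 0
  | y :: t => t.foldl max y + 2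

-- Pre_ excludes exactly the inputs on which A raises: empty end_ (ValueError from max), end_ or
-- add shorter than start, or a mark index outside the Python index range [-x, x) of the table.
def Pre_imos_1 (start : List Int) (end_ : List Int) (add : List Int) : Prop :=
  end_ ≠ [] ∧ start.length ≤ end_.length ∧ start.length ≤ add.length ∧
  ∀ i < start.length,
    -pvTop end_ ≤ start.getD i 0 ∧ start.getD i 0 < pvTop end_ ∧
    -pvTop end_ ≤ end_.getD i 0 + 1 ∧ end_.getD i 0 + 1 < pvTop end_
instance (start : List Int) (end_ : List Int) (add : List Int) : Decidable (Pre_imos_1 start end_ add) := by unfold Pre_imos_1; infer_instance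

def pvWitness_imos_1 : List Int × List Int × List Int := ([1, 4], [2, 6], [10, -3])

def Spec_imos_1 (start : List Int) (end_ : List Int) (add : List Int) (out : List Int) : Prop := out = imos_1_alt start end_ add
instance (start : List Int) (end_ : List Int) (add : List Int) (out : List Int) : Decidable (Spec_imos_1 start end_ add out) := by unfold Spec_imos_1; infer_instance

-- ===== CLAIM (what is proved, stated in full; the proofs are below) =====
def Claim_equal_imos_1 : Prop := ∀ (start : List Int) (end_ : List Int) (add : List Int), Dom_imos_1 start end_ add → Pre_imos_1 start end_ add → Spec_imos_1 start end_ add (imos_1 start end_ add)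

-- ===== LEMMAS AND PROOFS =====

-- Python index normalization (proof-only: where a possibly-negative in-range mark lands)
def pvPos (i L : Int) : Int := if i < 0 then i + L else i

-- contribution of interval (s, e, a) to the difference array at cell k of a table of length L
def pvContrib (s e a L : Int) (k : ℕ) : Int :=
  (if pvPos s L = (k : Int) then a else 0) - (if pvPos (e + 1) L = (k : Int) then a else 0)

theorem pvPos_bounds {i L : Int} (h0 : -L ≤ i) (h1 : i < L) :
    0 ≤ pvPos i L ∧ pvPos i L < L := by
  unfold pvPos; split_ifs <;> omega

theorem pvIdx_eq (n : ℕ) (i : Int) (h0 : -(n : Int) ≤ i) (h1 : i < (n : Int)) :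
    PySem.List.pyIdx? n i = some (pvPos i (n : Int)).toNat := by
  unfold PySem.List.pyIdx? pvPos
  split_ifs <;> exact congrArg some (by omega)

theorem pvGetD_set (t : List Int) (j k : ℕ) (v : Int) (_hj : j < t.length) (hk : k < t.length) :
    (t.set j v).getD k 0 = if j = k then v else t.getD k 0 := by
  rw [List.getD_eq_getElem _ _ (by simpa using hk), List.getElem_set]
  split_ifs with h
  · rfl
  · exact (List.getD_eq_getElem _ _ hk).symm

theorem pvBump_spec (t : List Int) (p v : Int)
    (h0 : -(t.length : Int) ≤ p) (h1 : p < (t.length : Int)) :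
    pvBump t p v
      = some (t.set (pvPos p (t.length : Int)).toNat
          (t.getD (pvPos p (t.length : Int)).toNat 0 + v)) := by
  have hpb := pvPos_bounds h0 h1
  have hlt : (pvPos p (t.length : Int)).toNat < t.length := by omega
  have hidx : PySem.List.pyIdx? t.length p = some (pvPos p (t.length : Int)).toNat :=
    pvIdx_eq _ _ h0 h1
  simp only [pvBump, PySem.List.pyGet?, PySem.List.pySet?, hidx]
  simp [List.getElem?_eq_getElem hlt]

theorem pvMark_spec (start end_ add : List Int) (L : ℕ) (n : ℕ)
    (hns : n ≤ start.length) (hne : n ≤ end_.length) (hna : n ≤ add.length)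
    (hb : ∀ i < n, -(L : Int) ≤ start.getD i 0 ∧ start.getD i 0 < (L : Int) ∧
        -(L : Int) ≤ end_.getD i 0 + 1 ∧ end_.getD i 0 + 1 < (L : Int))
    (t : List Int) (ht : t.length = L) :
    ∃ d : List Int,
      (List.range n).foldl (pvMarkStep start end_ add) (some t) = some d ∧ d.length = L ∧
      ∀ k < L, d.getD k 0 = t.getD k 0 +
        ∑ i ∈ Finset.range n,
          pvContrib (start.getD i 0) (end_.getD i 0) (add.getD i 0) (L : Int) k := by
  induction n with
  | zero => exact ⟨t, by simp, ht, fun k _ => by simp⟩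
  | succ n ih =>
    obtain ⟨d, hd, hdl, hdk⟩ := ih (by omega) (by omega) (by omega)
      (fun i hi => hb i (by omega))
    rw [List.range_succ, List.foldl_append, hd]
    have hsn : n < start.length := by omega
    have hen : n < end_.length := by omega
    have han : n < add.length := by omega
    obtain ⟨hs0, hs1, he0, he1⟩ := hb n (by omega)
    set s := start.getD n 0 with hs
    set e := end_.getD n 0 with he
    set a := add.getD n 0 with ha
    have hgs : PySem.List.pyGet? start (n : Int) = some s := by
      rw [PySem.List.pyGet?_natCast, List.getElem?_eq_getElem hsn, hs,
        List.getD_eq_getElem _ _ hsn]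
    have hge : PySem.List.pyGet? end_ (n : Int) = some e := by
      rw [PySem.List.pyGet?_natCast, List.getElem?_eq_getElem hen, he,
        List.getD_eq_getElem _ _ hen]
    have hga : PySem.List.pyGet? add (n : Int) = some a := by
      rw [PySem.List.pyGet?_natCast, List.getElem?_eq_getElem han, ha,
        List.getD_eq_getElem _ _ han]
    have hdlL : ((d.length : ℕ) : Int) = (L : Int) := by rw [hdl]
    obtain ⟨hsp0, hsp1⟩ := pvPos_bounds hs0 hs1
    obtain ⟨hep0, hep1⟩ := pvPos_bounds he0 he1
    have hb1 := pvBump_spec d s a (by omega) (by omega)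
    rw [hdlL] at hb1
    set d1 := d.set (pvPos s (L : Int)).toNat (d.getD (pvPos s (L : Int)).toNat 0 + a) with hd1
    have hd1l : d1.length = L := by simp [hd1, hdl]
    have hd1lL : ((d1.length : ℕ) : Int) = (L : Int) := by rw [hd1l]
    have hb2 := pvBump_spec d1 (e + 1) (-a) (by omega) (by omega)
    rw [hd1lL] at hb2
    set d2 := d1.set (pvPos (e + 1) (L : Int)).toNat
      (d1.getD (pvPos (e + 1) (L : Int)).toNat 0 + -a) with hd2
    refine ⟨d2, ?_, by simp [hd2, hd1l], ?_⟩
    · simp [pvMarkStep, hgs, hga, hge, hb1, hb2]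
    · intro k hk
      have hkd1 : k < d1.length := by omega
      have hkd : k < d.length := by omega
      have hsd : (pvPos s (L : Int)).toNat < d.length := by omega
      have hed1 : (pvPos (e + 1) (L : Int)).toNat < d1.length := by omega
      have hedd : (pvPos (e + 1) (L : Int)).toNat < d.length := by omega
      have hval : d1.getD (pvPos (e + 1) (L : Int)).toNat 0
          = if (pvPos s (L : Int)).toNat = (pvPos (e + 1) (L : Int)).toNat
              then d.getD (pvPos s (L : Int)).toNat 0 + a
              else d.getD (pvPos (e + 1) (L : Int)).toNat 0 := by
        rw [hd1, pvGetD_set _ _ _ _ hsd hedd]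
      have hstep : d2.getD k 0 = d.getD k 0 + pvContrib s e a (L : Int) k := by
        rw [hd2, pvGetD_set _ _ _ _ hed1 hkd1, hval, hd1, pvGetD_set _ _ _ _ hsd hkd]
        unfold pvContrib
        by_cases h1 : pvPos s (L : Int) = (k : Int)
        · have h1' : (pvPos s (L : Int)).toNat = k := by omega
          by_cases h2 : pvPos (e + 1) (L : Int) = (k : Int)
          · rw [if_pos (show (pvPos (e + 1) (L : Int)).toNat = k by omega),
              if_pos (show (pvPos s (L : Int)).toNat = (pvPos (e + 1) (L : Int)).toNat by omega),
              if_pos h1, if_pos h2, h1']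
            ring
          · rw [if_neg (show ¬ (pvPos (e + 1) (L : Int)).toNat = k by omega), if_pos h1',
              if_pos h1, if_neg h2, h1']
            ring
        · have h1' : ¬ (pvPos s (L : Int)).toNat = k := by omega
          by_cases h2 : pvPos (e + 1) (L : Int) = (k : Int)
          · rw [if_pos (show (pvPos (e + 1) (L : Int)).toNat = k by omega),
              if_neg (show ¬ (pvPos s (L : Int)).toNat = (pvPos (e + 1) (L : Int)).toNat by omega),
              if_neg h1, if_pos h2, (show (pvPos (e + 1) (L : Int)).toNat = k by omega)]
            ring
          · rw [if_neg (show ¬ (pvPos (e + 1) (L : Int)).toNat = k by omega), if_neg h1',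
              if_neg h1, if_neg h2]
            ring
      rw [hstep, hdk k hk, Finset.sum_range_succ, ← hs, ← he, ← ha]
      ring

theorem pvPref_spec (d : List Int) (c : ℕ) (hc : c < d.length) :
    ∃ t : List Int,
      (PySem.List.pyRange 1 (1 + (c : Int)) 1).foldl pvPrefStep (some d) = some t ∧
      t.length = d.length ∧
      ∀ k < d.length, t.getD k 0 =
        if k < c + 1 then ∑ j ∈ Finset.range (k + 1), d.getD j 0 else d.getD k 0 := by
  induction c with
  | zero =>
    refine ⟨d, by simp [PySem.List.pyRange_one_eq_nil], rfl, ?_⟩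
    intro k hk
    split_ifs with h
    · interval_cases k
      simp
    · rfl
  | succ c ih =>
    obtain ⟨t, hfold, htl, htk⟩ := ih (by omega)
    have hsplit : PySem.List.pyRange 1 (1 + ((c : Int) + 1)) 1
        = PySem.List.pyRange 1 (1 + (c : Int)) 1 ++ [1 + (c : Int)] := by
      have : (1 + ((c : Int) + 1)) = (1 + (c : Int)) + 1 := by ring
      rw [this, PySem.List.pyRange_one_succ_right (by omega)]
    have hkc1 : c + 1 < t.length := by omega
    have hkc : c < t.length := by omega
    have hv : PySem.List.pyGet? t (1 + (c : Int)) = some (t.getD (c + 1) 0) := by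
      have h : (1 + (c : Int)) = (((c + 1 : ℕ) : ℕ) : Int) := by push_cast; ring
      rw [h, PySem.List.pyGet?_natCast, List.getElem?_eq_getElem hkc1,
        List.getD_eq_getElem _ _ hkc1]
    have hw : PySem.List.pyGet? t (1 + (c : Int) - 1) = some (t.getD c 0) := by
      have h : (1 + (c : Int) - 1) = ((c : ℕ) : Int) := by ring
      rw [h, PySem.List.pyGet?_natCast, List.getElem?_eq_getElem hkc,
        List.getD_eq_getElem _ _ hkc]
    push_cast
    rw [hsplit, List.foldl_append, hfold]
    refine ⟨t.set (c + 1) (t.getD (c + 1) 0 + t.getD c 0), ?_, by simp [htl], ?_⟩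
    · simp [pvPrefStep, hv]
      rw [List.getElem?_eq_getElem hkc]
      show PySem.List.pySet? t (1 + (c : Int)) _ = _
      rw [(show (1 + (c : Int)) = (((c + 1 : ℕ) : ℕ) : Int) from by push_cast; ring),
        PySem.List.pySet?_natCast _ _ _ hkc1]
      simp
    · intro k hk
      have hkt : k < t.length := by omega
      rw [pvGetD_set _ _ _ _ hkc1 hkt]
      rcases Nat.lt_trichotomy k (c + 1) with h | h | h
      · rw [if_neg (by omega), htk k hk, if_pos (by omega), if_pos (by omega)]
      · subst h
        rw [if_pos rfl, if_pos (by omega)]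
        rw [htk (c + 1) hk, if_neg (by omega), htk c (by omega), if_pos (by omega)]
        rw [Finset.sum_range_succ (fun x => d.getD x 0) (c + 1)]
        ring
      · rw [if_neg (by omega), htk k hk, if_neg (by omega), if_neg (by omega)]

-- B's zip-marking fold equals A's index-loop marking fold (truncation never fires: len start ≤ both)
theorem pvZipMark : ∀ (s e a : List Int), s.length ≤ e.length → s.length ≤ a.length →
    ∀ (init : Option (List Int)),
      ((s.zip e).zip a).foldl pvBStep init
        = (List.range s.length).foldl (pvMarkStep s e a) init
  | [], e, a, _, _, init => by simp
  | s0 :: s, [], a, he, _, init => by simp at he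
  | s0 :: s, e0 :: e, [], _, ha, init => by simp at ha
  | s0 :: s, e0 :: e, a0 :: a, he, ha, init => by
    simp only [List.zip_cons_cons, List.foldl_cons, List.length_cons,
      List.range_succ_eq_map, List.foldl_map]
    rw [pvZipMark s e a (by simpa using he) (by simpa using ha)]
    have hhead : pvBStep init ((s0, e0), a0) = pvMarkStep (s0 :: s) (e0 :: e) (a0 :: a) init 0 := by
      cases init with
      | none => rfl
      | some t =>
        simp [pvBStep, pvMarkStep]
    have hshift : (fun (t : Option (List Int)) (i : ℕ) =>
        pvMarkStep (s0 :: s) (e0 :: e) (a0 :: a) t (i + 1)) = pvMarkStep s e a := by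
      funext t i
      cases t with
      | none => rfl
      | some u =>
        simp only [pvMarkStep, PySem.List.pyGet?_natCast, List.getElem?_cons_succ]
    rw [hhead, hshift]

-- the descending-accumulator list produced by B's reversed loop
def pvDesc (acc : Int) : List Int → List Int
  | [] => []
  | v :: r => acc :: pvDesc (acc - v) r

theorem pvDescFold : ∀ (r : List Int) (out : List Int) (acc : Int),
    r.foldl (fun (q : List Int × Int) v => (q.1 ++ [q.2], q.2 - v)) (out, acc)
      = (out ++ pvDesc acc r, acc - r.sum)
  | [], out, acc => by simp [pvDesc]
  | v :: r, out, acc => by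
    simp only [List.foldl_cons, pvDescFold r (out ++ [acc]) (acc - v), pvDesc,
      List.append_assoc, List.singleton_append, List.sum_cons, Prod.mk.injEq]
    exact ⟨trivial, by ring⟩

theorem pvDesc_length : ∀ (r : List Int) (acc : Int), (pvDesc acc r).length = r.length
  | [], _ => rfl
  | v :: r, acc => by simp [pvDesc, pvDesc_length r (acc - v)]

theorem pvDesc_getD : ∀ (r : List Int) (acc : Int) (i : ℕ), i < r.length →
    (pvDesc acc r).getD i 0 = acc - ∑ j ∈ Finset.range i, r.getD j 0
  | [], _, i, hi => by simp at hi
  | v :: r, acc, 0, _ => by simp [pvDesc]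
  | v :: r, acc, i + 1, hi => by
    simp only [pvDesc, List.getD_cons_succ]
    rw [pvDesc_getD r (acc - v) i (by simpa using hi), Finset.sum_range_succ']
    simp only [List.getD_cons_succ, List.getD_cons_zero]
    ring

theorem pvSum_eq : ∀ (l : List Int), l.sum = ∑ j ∈ Finset.range l.length, l.getD j 0
  | [] => by simp
  | v :: l => by
    rw [List.sum_cons, pvSum_eq l, List.length_cons, Finset.sum_range_succ']
    simp [add_comm]

theorem pvReplicate_getD (L k : ℕ) : (List.replicate L (0 : Int)).getD k 0 = 0 := by
  rcases Nat.lt_or_ge k L with h | h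
  · rw [List.getD_eq_getElem _ _ (by simpa using h), List.getElem_replicate]
  · rw [List.getD_eq_default _ _ (by simpa using h)]

-- ===== VERDICT (by name: the statement is the Claim_ definition above) =====
theorem imos_1_spec : Claim_equal_imos_1 := by
  intro start end_ add _ hpre
  obtain ⟨hne, hls, hla, hb⟩ := hpre
  unfold Spec_imos_1 imos_1 imos_1_alt
  obtain ⟨y, tl, rfl⟩ : ∃ y tl, end_ = y :: tl := by
    cases end_ with
    | nil => exact absurd rfl hne
    | cons y tl => exact ⟨y, tl, rfl⟩
  simp only [PySem.List.max?_id_cons]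
  set m : Int := (List.foldl max y tl) with hm
  set x : Int := m + 2 with hx
  have htop : pvTop (y :: tl) = x := by unfold pvTop; rw [hx, hm]
  rw [htop] at hb
  set L : ℕ := x.toNat with hL
  have hb' : ∀ i < start.length,
      -(L : Int) ≤ start.getD i 0 ∧ start.getD i 0 < (L : Int) ∧
      -(L : Int) ≤ (y :: tl).getD i 0 + 1 ∧ (y :: tl).getD i 0 + 1 < (L : Int) := by
    intro i hi
    obtain ⟨h1, h2, h3, h4⟩ := hb i hi
    have hx1 : 1 ≤ x := by omega
    constructor
    · omega
    · refine ⟨by omega, by omega, by omega⟩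
  obtain ⟨d, hd, hdl, hdk⟩ := pvMark_spec start (y :: tl) add L start.length
    le_rfl hls hla hb' (List.replicate L 0) (by simp)
  rw [pvZipMark start (y :: tl) add hls hla, hd]
  have hdsum : ∀ k < L, d.getD k 0 = ∑ i ∈ Finset.range start.length,
      pvContrib (start.getD i 0) ((y :: tl).getD i 0) (add.getD i 0) (L : Int) k := by
    intro k hk
    rw [hdk k hk, pvReplicate_getD, zero_add]
  by_cases hxpos : 1 ≤ x
  · -- main case: the table is nonempty
    have hL1 : 1 ≤ L := by omega
    obtain ⟨t, hp, htl, htk⟩ := pvPref_spec d (L - 1) (by omega)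
    have hrange : (1 + ((L - 1 : ℕ) : Int)) = x := by omega
    rw [hrange] at hp
    rw [hp, Option.getD_some]
    show t = (d.reverse.foldl (fun (q : List Int × Int) v => (q.1 ++ [q.2], q.2 - v))
      ([], d.sum)).1.reverse
    rw [pvDescFold]
    show t = ([] ++ pvDesc d.sum d.reverse).reverse
    rw [List.nil_append]
    apply List.ext_getElem
    · rw [htl, hdl, List.length_reverse, pvDesc_length, List.length_reverse, hdl]
    · intro k hk1 hk2
      have hkL : k < L := by omega
      have hkd : k < d.length := by omega
      have hleft : t[k] = ∑ j ∈ Finset.range (k + 1), d.getD j 0 := by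
        rw [← List.getD_eq_getElem t 0 hk1, htk k (by omega), if_pos (by omega)]
      have hlen : (pvDesc d.sum d.reverse).length = L := by
        rw [pvDesc_length, List.length_reverse, hdl]
      have hkp : L - 1 - k < (pvDesc d.sum d.reverse).length := by omega
      have hright : ((pvDesc d.sum d.reverse).reverse)[k]'(by
            rw [List.length_reverse, pvDesc_length, List.length_reverse]; omega)
          = d.sum - ∑ j ∈ Finset.range (L - 1 - k), d.reverse.getD j 0 := by
        rw [List.getElem_reverse, ← List.getD_eq_getElem _ 0 (by omega),
          (show (pvDesc d.sum d.reverse).length - 1 - k = L - 1 - k by omega),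
          pvDesc_getD d.reverse d.sum (L - 1 - k) (by rw [List.length_reverse, hdl]; omega)]
      rw [hleft, hright]
      set c := L - 1 - k with hc
      have h1 : ∑ j ∈ Finset.range c, d.reverse.getD j 0
          = ∑ j ∈ Finset.range c, d.getD (L - 1 - j) 0 := by
        apply Finset.sum_congr rfl
        intro j hj
        rw [Finset.mem_range] at hj
        have hjL : j < d.reverse.length := by rw [List.length_reverse]; omega
        rw [List.getD_eq_getElem _ 0 hjL, List.getElem_reverse,
          List.getD_eq_getElem _ 0 (by omega)]
        congr 1
        omega
      have h2 : ∑ j ∈ Finset.range c, d.getD (L - 1 - j) 0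
          = ∑ j ∈ Finset.range c, d.getD (k + 1 + j) 0 := by
        rw [← Finset.sum_range_reflect (fun j => d.getD (L - 1 - j) 0) c]
        apply Finset.sum_congr rfl
        intro j hj
        rw [Finset.mem_range] at hj
        congr 1
        omega
      have h3 : ∑ j ∈ Finset.range L, d.getD j 0
          = ∑ j ∈ Finset.range (k + 1), d.getD j 0
            + ∑ j ∈ Finset.range c, d.getD (k + 1 + j) 0 := by
        rw [show L = k + 1 + c from by omega, Finset.sum_range_add]
      rw [h1, h2, pvSum_eq d, hdl, h3]
      ring
  · -- degenerate case: x ≤ 0, so the table, start and all loops are empty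
    have hs0 : start = [] := by
      cases start with
      | nil => rfl
      | cons s0 st =>
        obtain ⟨h1, h2, _⟩ := hb 0 (by simp)
        omega
    have hL0 : L = 0 := by omega
    have hd0 : d = [] := List.eq_nil_of_length_eq_zero (by omega)
    rw [hd0]
    simp [PySem.List.pyRange_one_eq_nil (show x ≤ 1 by omega)]
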